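-- pv_equiv track=rewrite | github.com/amithachari/Search | search.py | find_closest_goal
-- ===== SOURCE A (Python) =====
-- def find_closest_goal(neighbor, new_waypoints):
--     closest = new_waypoints[0]
--     length0 = abs(neighbor[0] - closest[0]) + abs(neighbor[1] - closest[1])
--     for waypoint in new_waypoints:
--         length = abs(neighbor[0] - waypoint[0]) + abs(neighbor[1] - waypoint[1])
--         if length < length0:
--             length0 = length
--             closest = waypoint
--     return closest, length0
-- ===== SOURCE B (Python) =====
-- def find_closest_goal(neighbor, new_waypoints):
--     dists = [abs(neighbor[0] - w[0]) + abs(neighbor[1] - w[1]) for w in new_waypoints]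
--     m = min(dists)
--     return new_waypoints[dists.index(m)], m
-- ===== Notes on version B (the rewrite author's own statement) =====
-- stated objective: alternative
-- what changed: B replaces A's running-minimum accumulator loop by a three-phase decomposition: build the full distance list in one comprehension, take min(), and index the first occurrence.
import Mathlib
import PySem

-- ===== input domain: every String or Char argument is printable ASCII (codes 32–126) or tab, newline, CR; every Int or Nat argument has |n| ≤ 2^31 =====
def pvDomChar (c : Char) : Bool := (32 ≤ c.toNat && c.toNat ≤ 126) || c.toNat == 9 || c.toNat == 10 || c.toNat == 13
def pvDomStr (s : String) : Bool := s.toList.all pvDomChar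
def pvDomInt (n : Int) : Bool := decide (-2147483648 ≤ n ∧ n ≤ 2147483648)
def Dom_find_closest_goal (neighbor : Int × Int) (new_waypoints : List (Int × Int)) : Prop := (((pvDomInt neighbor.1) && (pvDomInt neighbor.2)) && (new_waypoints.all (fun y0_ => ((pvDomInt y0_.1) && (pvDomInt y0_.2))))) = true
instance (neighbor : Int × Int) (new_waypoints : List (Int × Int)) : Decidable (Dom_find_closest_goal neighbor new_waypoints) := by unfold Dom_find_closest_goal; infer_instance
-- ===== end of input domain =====

-- B replaces A's running-minimum accumulator loop by a three-phase decomposition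
-- (distance list, min, first index); same O(n) cost, no speed claim.


-- Manhattan distance |n0-w0| + |n1-w1| (shared arithmetic helper)
def pvDist (neighbor w : Int × Int) : Int :=
  |neighbor.1 - w.1| + |neighbor.2 - w.2|

-- A's loop body: update (closest, length0) if the new waypoint is strictly closer
def pvStep (neighbor : Int × Int) (s : (Int × Int) × Int) (w : Int × Int) : (Int × Int) × Int :=
  let length := pvDist neighbor w
  if length < s.2 then (w, length) else s

-- ===== PORT A =====
def find_closest_goal (neighbor : Int × Int) (new_waypoints : List (Int × Int)) : (Int × Int) × Int :=
  match new_waypoints with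
  | [] => ((0, 0), 0)   -- new_waypoints[0] raises IndexError in Python; excluded by Pre_
  | closest :: _ =>
    let length0 := pvDist neighbor closest
    new_waypoints.foldl (pvStep neighbor) (closest, length0)

-- ===== PORT B =====
def find_closest_goal_alt (neighbor : Int × Int) (new_waypoints : List (Int × Int)) : (Int × Int) × Int :=
  let dists := new_waypoints.map (pvDist neighbor)
  match PySem.List.min? dists (fun x => x) with
  | none => ((0, 0), 0)   -- min([]) raises ValueError in Python; excluded by Pre_
  | some m =>
    match PySem.List.index? dists m with
    | none => ((0, 0), 0)  -- unreachable: m ∈ dists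
    | some i => (new_waypoints.getD i (0, 0), m)

-- ===== PRECONDITION & SPEC =====
-- A raises IndexError (and B ValueError) on the empty waypoint list; both are excluded.
def Pre_find_closest_goal (neighbor : Int × Int) (new_waypoints : List (Int × Int)) : Prop :=
  new_waypoints ≠ []
instance (neighbor : Int × Int) (new_waypoints : List (Int × Int)) : Decidable (Pre_find_closest_goal neighbor new_waypoints) := by unfold Pre_find_closest_goal; infer_instance
def pvWitness_find_closest_goal : (Int × Int) × (List (Int × Int)) := ((0, 0), [(1, 2), (3, 4)])

def Spec_find_closest_goal (neighbor : Int × Int) (new_waypoints : List (Int × Int)) (out : (Int × Int) × Int) : Prop := out = find_closest_goal_alt neighbor new_waypoints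
instance (neighbor : Int × Int) (new_waypoints : List (Int × Int)) (out : (Int × Int) × Int) : Decidable (Spec_find_closest_goal neighbor new_waypoints out) := by unfold Spec_find_closest_goal; infer_instance

-- ===== CLAIM (what is proved, stated in full; the proofs are below) =====
def Claim_equal_find_closest_goal : Prop := ∀ (neighbor : Int × Int) (new_waypoints : List (Int × Int)), Dom_find_closest_goal neighbor new_waypoints → Pre_find_closest_goal neighbor new_waypoints → Spec_find_closest_goal neighbor new_waypoints (find_closest_goal neighbor new_waypoints)

-- ===== LEMMAS AND PROOFS =====

theorem pv_foldl_min_assoc (ys : List Int) : ∀ a b : Int,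
    ys.foldl min (min a b) = min a (ys.foldl min b) := by
  induction ys with
  | nil => intro a b; rfl
  | cons c ys ih =>
    intro a b
    simp only [List.foldl]
    rw [min_assoc, ih]

theorem pv_min?_cons (x : Int) (xs : List Int) :
    PySem.List.min? (x :: xs) (fun y => y) =
      some (match PySem.List.min? xs (fun y => y) with
            | none => x
            | some m => min x m) := by
  cases xs with
  | nil => rfl
  | cons y ys =>
    rw [PySem.List.min?_id_cons, PySem.List.min?_id_cons]
    simp only [List.foldl]
    rw [pv_foldl_min_assoc]

-- Bexp: B's three-phase expression applied to tail `t` with running state (c, l).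
def pvBexp (neighbor : Int × Int) (c : Int × Int) (l : Int) (t : List (Int × Int)) : (Int × Int) × Int :=
  match PySem.List.min? (t.map (pvDist neighbor)) (fun x => x) with
  | none => (c, l)
  | some m =>
    if m < l then
      match PySem.List.index? (t.map (pvDist neighbor)) m with
      | none => (c, l)
      | some i => (t.getD i (0, 0), m)
    else (c, l)

theorem pv_step_lt (neighbor : Int × Int) (s : (Int × Int) × Int) (w : Int × Int)
    (h : pvDist neighbor w < s.2) : pvStep neighbor s w = (w, pvDist neighbor w) := by
  simp [pvStep, h]

theorem pv_step_ge (neighbor : Int × Int) (s : (Int × Int) × Int) (w : Int × Int)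
    (h : ¬ pvDist neighbor w < s.2) : pvStep neighbor s w = s := by
  simp [pvStep, h]

theorem pv_loop_eq_bexp (neighbor : Int × Int) (t : List (Int × Int)) :
    ∀ (c : Int × Int) (l : Int),
    t.foldl (pvStep neighbor) (c, l) = pvBexp neighbor c l t := by
  induction t with
  | nil => intro c l; rfl
  | cons w t ih =>
    intro c l
    rw [List.foldl_cons]
    by_cases hw : pvDist neighbor w < l
    · rw [pv_step_lt neighbor (c, l) w hw, ih w (pvDist neighbor w)]
      simp only [pvBexp, List.map]
      rw [pv_min?_cons]
      cases hmt : PySem.List.min? (t.map (pvDist neighbor)) (fun x => x) with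
      | none =>
        have ht : t = [] := by
          cases t with
          | nil => rfl
          | cons a b => rw [List.map, PySem.List.min?_id_cons] at hmt; cases hmt
        subst ht
        simp [hw, List.getD]
      | some m' =>
        dsimp only
        by_cases hm' : m' < pvDist neighbor w
        · rw [min_eq_right (le_of_lt hm')]
          have hne : pvDist neighbor w ≠ m' := ne_of_gt hm'
          rw [PySem.List.index?_cons_of_ne _ hne]
          have hmem : m' ∈ t.map (pvDist neighbor) := PySem.List.min?_mem hmt
          obtain ⟨i, hi⟩ := Option.isSome_iff_exists.mp ((PySem.List.index?_isSome_iff _ _).mpr hmem)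
          rw [hi]
          simp [hm', lt_trans hm' hw, List.getD]
        · have hle : pvDist neighbor w ≤ m' := le_of_not_gt hm'
          rw [min_eq_left hle, PySem.List.index?_cons_self]
          simp [hm', hw, List.getD]
    · rw [pv_step_ge neighbor (c, l) w hw, ih c l]
      simp only [pvBexp, List.map]
      rw [pv_min?_cons]
      cases hmt : PySem.List.min? (t.map (pvDist neighbor)) (fun x => x) with
      | none => simp [hw]
      | some m' =>
        dsimp only
        by_cases hm' : m' < pvDist neighbor w
        · rw [min_eq_right (le_of_lt hm')]
          have hne : pvDist neighbor w ≠ m' := ne_of_gt hm'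
          rw [PySem.List.index?_cons_of_ne _ hne]
          have hmem : m' ∈ t.map (pvDist neighbor) := PySem.List.min?_mem hmt
          obtain ⟨i, hi⟩ := Option.isSome_iff_exists.mp ((PySem.List.index?_isSome_iff _ _).mpr hmem)
          rw [hi]
          by_cases hml : m' < l
          · simp [hml, List.getD]
          · simp [hml]
        · have hle : pvDist neighbor w ≤ m' := le_of_not_gt hm'
          rw [min_eq_left hle, PySem.List.index?_cons_self]
          have hml : ¬ m' < l := fun h => hw (lt_of_le_of_lt hle h)
          simp [hml, hw]

theorem find_closest_goal_spec : Claim_equal_find_closest_goal := by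
  intro neighbor ws _ hpre
  unfold Spec_find_closest_goal
  cases ws with
  | nil => exact absurd rfl hpre
  | cons h t =>
    show find_closest_goal neighbor (h :: t) = find_closest_goal_alt neighbor (h :: t)
    unfold find_closest_goal find_closest_goal_alt
    dsimp only
    rw [List.foldl_cons, pv_step_ge neighbor _ h (lt_irrefl _), pv_loop_eq_bexp]
    simp only [pvBexp, List.map]
    rw [pv_min?_cons]
    cases hmt : PySem.List.min? (t.map (pvDist neighbor)) (fun x => x) with
    | none =>
      have ht : t = [] := by
        cases t with
        | nil => rfl
        | cons a b => rw [List.map, PySem.List.min?_id_cons] at hmt; cases hmt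
      subst ht
      simp [List.getD]
    | some m' =>
      dsimp only
      by_cases hm' : m' < pvDist neighbor h
      · rw [min_eq_right (le_of_lt hm')]
        have hne : pvDist neighbor h ≠ m' := ne_of_gt hm'
        rw [PySem.List.index?_cons_of_ne _ hne]
        have hmem : m' ∈ t.map (pvDist neighbor) := PySem.List.min?_mem hmt
        obtain ⟨i, hi⟩ := Option.isSome_iff_exists.mp ((PySem.List.index?_isSome_iff _ _).mpr hmem)
        rw [hi]
        simp [hm', List.getD]
      · have hle : pvDist neighbor h ≤ m' := le_of_not_gt hm'
        rw [min_eq_left hle, PySem.List.index?_cons_self]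
        simp [hm', List.getD]
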